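-- pv_equiv track=rewrite | github.com/ventasliquid-png/Sonido_Liquido_V5 | scripts/session_manager.py | prune_sessions
-- ===== SOURCE A (Python) =====
-- def prune_sessions(sessions, current_agent):
--     # Logic:
--     # 1. Keep Current Chain (Continuous sessions of current_agent)
--     # 2. Keep Last Session of Other Agent
--     # 3. Keep Last Session of Current Agent BEFORE the Other Agent (Previous Own)
--
--     kept = []
--     other_found = False
--     prev_own_found = False
--
--     # Sessions are assumed to be passed in order: Newest First
--     # But parse_sessions usually returns Top-Down (Newest First if file is prepended, or Oldest First if appended)
--     # The user wants a log. Usually logs are appended. But for "Memory" usually we want to see latest first?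
--     # Let's assume the file structure is Newest Block at the TOP.
--
--     for s in sessions:
--         if s['agent'] == current_agent:
--             if not other_found:
--                 kept.append(s) # Continuous Chain
--             elif other_found and not prev_own_found:
--                 kept.append(s) # Previous Own
--                 prev_own_found = True
--             # Else: Drop older own sessions
--         else: # Other Agent
--             if not other_found:
--                 kept.append(s) # Last Other
--                 other_found = True
--             # Else: Drop older other sessions
--
--     return kept
-- ===== SOURCE B (Python) =====
-- def prune_sessions(sessions, current_agent):
--     # Decomposition: leading chain of current_agent, then the first "other"
--     # session, then the first subsequent own session.
--     i = 0
--     while i < len(sessions) and sessions[i]['agent'] == current_agent: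
--         i += 1
--     kept = sessions[:i]
--     if i < len(sessions):
--         kept.append(sessions[i])  # last other
--         for s in sessions[i + 1:]:
--             if s['agent'] == current_agent:
--                 kept.append(s)    # previous own
--                 break
--     return kept
-- ===== Notes on version B (the rewrite author's own statement) =====
-- stated objective: alternative
-- what changed: Replaces the flag-driven single pass (other_found/prev_own_found booleans threaded through one loop) by a three-part decomposition: take the leading run of current_agent sessions, append the first 'other' session, then scan for the first subsequent own session; B stops scanning once the previous-own session is found.
import Mathlib
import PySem

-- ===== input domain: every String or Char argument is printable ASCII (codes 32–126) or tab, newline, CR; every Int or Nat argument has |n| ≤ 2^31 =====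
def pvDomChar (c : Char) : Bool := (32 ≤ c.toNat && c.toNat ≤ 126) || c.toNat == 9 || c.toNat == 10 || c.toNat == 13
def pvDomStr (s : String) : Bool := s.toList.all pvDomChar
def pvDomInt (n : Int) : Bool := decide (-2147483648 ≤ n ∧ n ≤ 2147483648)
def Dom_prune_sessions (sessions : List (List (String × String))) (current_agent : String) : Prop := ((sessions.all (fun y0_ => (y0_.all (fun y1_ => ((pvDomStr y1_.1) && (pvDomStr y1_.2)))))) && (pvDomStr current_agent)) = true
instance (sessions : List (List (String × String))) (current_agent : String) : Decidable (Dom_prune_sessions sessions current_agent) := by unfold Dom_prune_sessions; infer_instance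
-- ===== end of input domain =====

-- B decomposes the pruning into chain + first-other + first-own instead of A's flag-driven pass.
-- ===== PORT A =====
-- flag-driven loop; s['agent'] lookup; Pre_ guarantees the key exists (else Python raises KeyError)
def pruneAgo (current_agent : String) (other_found prev_own_found : Bool) :
    List (List (String × String)) → List (List (String × String))
  | [] => []
  | s :: rest =>
    if PySem.Dict.getD (PySem.Dict.mk s) "agent" "" == current_agent then
      if !other_found then
        s :: pruneAgo current_agent other_found prev_own_found rest
      else if other_found && !prev_own_found then
        s :: pruneAgo current_agent other_found true rest
      else
        pruneAgo current_agent other_found prev_own_found rest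
    else
      if !other_found then
        s :: pruneAgo current_agent true prev_own_found rest
      else
        pruneAgo current_agent other_found prev_own_found rest

def prune_sessions (sessions : List (List (String × String))) (current_agent : String) : List (List (String × String)) :=
  pruneAgo current_agent false false sessions

-- ===== PORT B =====
-- length of the leading run of current_agent sessions (B's while loop)
def pvChainLen (current_agent : String) : List (List (String × String)) → Nat
  | [] => 0
  | s :: rest =>
    if PySem.Dict.getD (PySem.Dict.mk s) "agent" "" == current_agent then pvChainLen current_agent rest + 1 else 0

-- B's break-ing for-loop: first subsequent own session, if any
def pvFirstOwn (current_agent : String) : List (List (String × String)) → List (List (String × String))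
  | [] => []
  | s :: rest =>
    if PySem.Dict.getD (PySem.Dict.mk s) "agent" "" == current_agent then [s] else pvFirstOwn current_agent rest

def prune_sessions_alt (sessions : List (List (String × String))) (current_agent : String) : List (List (String × String)) :=
  let i := pvChainLen current_agent sessions
  let kept := sessions.take i
  match sessions.drop i with
  | [] => kept
  | other :: rest => kept ++ other :: pvFirstOwn current_agent rest

-- ===== PRECONDITION & SPEC =====
-- Pre_ excludes inputs where some session dict has no 'agent' key: Python A raises KeyError there.
def Pre_prune_sessions (sessions : List (List (String × String))) (current_agent : String) : Prop :=
  ∀ s ∈ sessions, "agent" ∈ s.map Prod.fst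
instance (sessions : List (List (String × String))) (current_agent : String) : Decidable (Pre_prune_sessions sessions current_agent) := by
  unfold Pre_prune_sessions; infer_instance
def pvWitness_prune_sessions : (List (List (String × String))) × String :=
  ([[("agent", "a")], [("agent", "b")], [("agent", "a")]], "a")
def Spec_prune_sessions (sessions : List (List (String × String))) (current_agent : String) (out : List (List (String × String))) : Prop := out = prune_sessions_alt sessions current_agent
instance (sessions : List (List (String × String))) (current_agent : String) (out : List (List (String × String))) : Decidable (Spec_prune_sessions sessions current_agent out) := by unfold Spec_prune_sessions; infer_instance

-- ===== CLAIM (what is proved, stated in full; the proofs are below) =====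
def Claim_equal_prune_sessions : Prop := ∀ (sessions : List (List (String × String))) (current_agent : String), Dom_prune_sessions sessions current_agent → Pre_prune_sessions sessions current_agent → Spec_prune_sessions sessions current_agent (prune_sessions sessions current_agent)

-- ===== LEMMAS AND PROOFS =====
theorem pruneAgo_tt (ca : String) (l : List (List (String × String))) :
    pruneAgo ca true true l = [] := by
  induction l with
  | nil => rfl
  | cons s rest ih => simp [pruneAgo, ih]

theorem pruneAgo_tf (ca : String) (l : List (List (String × String))) :
    pruneAgo ca true false l = pvFirstOwn ca l := by
  induction l with
  | nil => rfl
  | cons s rest ih =>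
    by_cases h : PySem.Dict.getD (PySem.Dict.mk s) "agent" "" == ca
    · simp [pruneAgo, pvFirstOwn, h, pruneAgo_tt]
    · simp [pruneAgo, pvFirstOwn, h, ih]

theorem prune_eq (ca : String) (l : List (List (String × String))) :
    pruneAgo ca false false l = prune_sessions_alt l ca := by
  induction l with
  | nil => rfl
  | cons s rest ih =>
    by_cases h : PySem.Dict.getD (PySem.Dict.mk s) "agent" "" == ca
    · simp only [pruneAgo, h, if_true, Bool.not_false, ih,
        prune_sessions_alt, pvChainLen, List.take_succ_cons, List.drop_succ_cons]
      cases hd : rest.drop (pvChainLen ca rest) <;> simp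
    · simp [pruneAgo, h, pruneAgo_tf, prune_sessions_alt, pvChainLen]

-- ===== VERDICT (by name: the statement is the Claim_ definition above) =====
theorem prune_sessions_spec : Claim_equal_prune_sessions := by
  intro sessions ca _ _
  unfold Spec_prune_sessions prune_sessions
  exact prune_eq ca sessions
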